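-- pv_equiv track=rewrite | github.com/werewolves-devs/Werewolf_Bot | story_time/reader.py | insert_user
-- ===== SOURCE A (Python) =====
-- def insert_user(line,i,player_list):
--     if len(player_list) <= i:
--         return line
--
--     user = player_list[i]
--     broken_input = line.split('[{}]'.format(i))
--     msg = ''
--     for j in range(len(broken_input)):
--         if j > 0:
--             msg += user
--         msg += insert_user(broken_input[j],i+1,player_list)
--
--     return msg
-- ===== SOURCE B (Python) =====
-- def insert_user(line, i, player_list):
--     # Single left-to-right scan replacing "[k]" (exact decimal, i <= k < len(player_list))
--     # with player_list[k]; inserted names are never re-scanned (matches the recursion's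
--     # non-reprocessing). One O(len(line)) pass instead of per-index repeated splitting.
--     n = len(player_list)
--     out = []
--     pos = 0
--     L = len(line)
--     while pos < L:
--         c = line[pos]
--         if c == '[':
--             j = pos + 1
--             while j < L and line[j].isdigit():
--                 j += 1
--             seg = line[pos + 1:j]
--             if seg and j < L and line[j] == ']' and (seg == '0' or seg[0] != '0'):
--                 k = int(seg)
--                 if i <= k < n:
--                     out.append(player_list[k])
--                     pos = j + 1
--                     continue
--             out.append('[')
--             pos += 1
--         else:
--             out.append(c)
--             pos += 1
--     return ''.join(out)
-- ===== Notes on version B (the rewrite author's own statement) =====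
-- stated objective: faster
-- what changed: A recursively re-splits the whole line once per player index (split on '[i]', recurse on every piece with i+1); B makes a single left-to-right scan that parses each '[k]' placeholder once (exact decimal, no leading zeros, i <= k < len) and copies everything else verbatim.
-- outside the precondition, e.g. on insert_user('[-1]', -1, ['x']): A returns 'x', B returns '[-1]'
import Mathlib
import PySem

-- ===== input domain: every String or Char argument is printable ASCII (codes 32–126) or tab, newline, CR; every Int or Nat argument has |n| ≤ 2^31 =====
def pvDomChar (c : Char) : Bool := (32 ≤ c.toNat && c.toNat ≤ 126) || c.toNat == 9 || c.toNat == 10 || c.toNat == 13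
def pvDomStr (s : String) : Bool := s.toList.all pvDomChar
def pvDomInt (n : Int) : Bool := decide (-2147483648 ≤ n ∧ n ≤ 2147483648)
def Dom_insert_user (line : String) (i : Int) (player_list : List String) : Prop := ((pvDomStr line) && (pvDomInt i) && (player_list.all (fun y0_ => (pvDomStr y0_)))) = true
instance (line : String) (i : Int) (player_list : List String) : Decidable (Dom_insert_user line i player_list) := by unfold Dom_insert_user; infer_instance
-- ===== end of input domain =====

-- B replaces A's per-index recursion (one full split of the text for every index i, i+1, …)
-- by a single left-to-right scan of the line that parses each "[k]" placeholder once; objective: faster.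

-- ===== PORT A =====
-- recursion over the pieces of line.split('[i]'); measure: how far i is below len(player_list)
def insert_user_core (player_list : List String) (i : Int) (line : List Char) : List Char :=
  if h : PySem.List.len player_list ≤ i then line
  else
    -- user = player_list[i]; broken_input = line.split("[i]"); the j-loop accumulates msg
    (PySem.List.enumerate (PySem.Chars.splitOn line ('[' :: (PySem.Int.toChars i ++ [']'])))).foldl
      (fun msg jp =>
        (if jp.1 > 0 then msg ++ (PySem.List.pyGetD player_list i "").toList else msg)
          ++ insert_user_core player_list (i + 1) jp.2)
      []
termination_by (PySem.List.len player_list - i).toNat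
decreasing_by simp only [PySem.List.len_eq] at *; omega

def insert_user (line : String) (i : Int) (player_list : List String) : String :=
  String.ofList (insert_user_core player_list i line.toList)

-- ===== PORT B =====
-- int(seg) for an all-digit segment (B's `k = int(seg)`)
def pvDigitsVal (ds : List Char) : Int :=
  ds.foldl (fun a d => 10 * a + ((d.toNat : Int) - 48)) 0

-- single scan: copy chars; at '[' read the digit run, and replace a valid "[k]" by player_list[k]
def insert_user_scan (player_list : List String) (i : Int) : List Char → List Char
  | [] => []
  | c :: rest =>
    if c = '[' then
      -- ds = the digit run after '[', rest' = what follows it (B's seg / line[j:])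
      if (rest.takeWhile PySem.Chars.isdigit) ≠ [] ∧
          (rest.drop (rest.takeWhile PySem.Chars.isdigit).length).head? = some ']' ∧
          ((rest.takeWhile PySem.Chars.isdigit) = ['0'] ∨ (rest.takeWhile PySem.Chars.isdigit).head? ≠ some '0') then
        if i ≤ pvDigitsVal (rest.takeWhile PySem.Chars.isdigit) ∧
            pvDigitsVal (rest.takeWhile PySem.Chars.isdigit) < PySem.List.len player_list then
          (PySem.List.pyGetD player_list (pvDigitsVal (rest.takeWhile PySem.Chars.isdigit)) "").toList
            ++ insert_user_scan player_list i ((rest.drop (rest.takeWhile PySem.Chars.isdigit).length).drop 1)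
        else '[' :: insert_user_scan player_list i rest
      else '[' :: insert_user_scan player_list i rest
    else c :: insert_user_scan player_list i rest
termination_by cs => cs.length
decreasing_by all_goals simp only [List.length_drop, List.length_cons]; omega

def insert_user_alt (line : String) (i : Int) (player_list : List String) : String :=
  String.ofList (insert_user_scan player_list i line.toList)

-- ===== PRECONDITION & SPEC =====
-- Pre_ restricts to the natural domain 0 ≤ i (the recursion index starts at 0 in the caller);
-- for negative i A reads player names by Python negative-index wraparound and substitutes
-- "[-1]"-style placeholders relative to the end of the list (raising IndexError once
-- i < -len(player_list)), behaviour outside the function's purpose which B does not mimic.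
def Pre_insert_user (line : String) (i : Int) (player_list : List String) : Prop := 0 ≤ i
instance (line : String) (i : Int) (player_list : List String) : Decidable (Pre_insert_user line i player_list) := by unfold Pre_insert_user; infer_instance

def pvWitness_insert_user : String × Int × List String :=
  ("hi [0], meet [1] ([2] is out; [01] and [9] stay)", 0, ["Ann", "Bob"])

def Spec_insert_user (line : String) (i : Int) (player_list : List String) (out : String) : Prop := out = insert_user_alt line i player_list
instance (line : String) (i : Int) (player_list : List String) (out : String) : Decidable (Spec_insert_user line i player_list out) := by unfold Spec_insert_user; infer_instance

-- ===== CLAIM (what is proved, stated in full; the proofs are below) =====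
def Claim_equal_insert_user : Prop := ∀ (line : String) (i : Int) (player_list : List String), Dom_insert_user line i player_list → Pre_insert_user line i player_list → Spec_insert_user line i player_list (insert_user line i player_list)

-- ===== LEMMAS AND PROOFS =====

-- ---------- decimal digits: str(n) ↔ value round trips ----------

def pvDigitsOf (n : Nat) : List Char :=
  if n = 0 then ['0'] else (Nat.digits 10 n).reverse.map Nat.digitChar

lemma core_shift (f : Nat) : ∀ (n : Nat) (ds : List Char), n < 10 ^ (f + 1) →
    Nat.toDigitsCore 10 (f + 1) n ds = pvDigitsOf n ++ ds := by
  induction f with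
  | zero =>
    intro n ds h
    norm_num at h
    rw [Nat.toDigitsCore]
    rcases Nat.eq_zero_or_pos n with h0 | h0
    · subst h0; simp [pvDigitsOf]; decide
    · have hd : Nat.digits 10 n = [n] := by
        rw [Nat.digits_def' (by norm_num) h0]
        simp [Nat.div_eq_of_lt h, Nat.mod_eq_of_lt h]
      simp [pvDigitsOf, Nat.pos_iff_ne_zero.mp h0, hd, Nat.mod_eq_of_lt h, Nat.div_eq_of_lt h]
  | succ f ih =>
    intro n ds h
    rw [Nat.toDigitsCore]
    by_cases h10 : n / 10 = 0
    · have hn : n < 10 := by omega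
      rcases Nat.eq_zero_or_pos n with h0 | h0
      · subst h0; simp [pvDigitsOf]; decide
      · have hd : Nat.digits 10 n = [n] := by
          rw [Nat.digits_def' (by norm_num) h0]; simp [h10, Nat.mod_eq_of_lt hn]
        simp [pvDigitsOf, Nat.pos_iff_ne_zero.mp h0, hd, Nat.mod_eq_of_lt hn, h10]
    · rw [if_neg h10, ih (n / 10) _ (by omega)]
      have hn0 : n ≠ 0 := by omega
      have hd : Nat.digits 10 n = n % 10 :: Nat.digits 10 (n / 10) := by
        rw [Nat.digits_def' (by norm_num) (by omega)]
      simp [pvDigitsOf, hn0, h10, hd]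

lemma pv_char_eq_of_toNat {c d : Char} (h : c.toNat = d.toNat) : c = d :=
  Char.ext (UInt32.toNat_inj.mp h)

lemma pv_digitChar_lt10 (d : Nat) (h : d < 10) :
    PySem.Chars.isdigit (Nat.digitChar d) = true ∧ (Nat.digitChar d).toNat = d + 48 := by
  interval_cases d <;> exact ⟨by decide, by decide⟩

lemma pv_isdigit_iff (c : Char) : PySem.Chars.isdigit c = true ↔ 48 ≤ c.toNat ∧ c.toNat ≤ 57 := by
  simp only [PySem.Chars.isdigit, Bool.and_eq_true, decide_eq_true_eq, Char.le_def]
  unfold Char.toNat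
  constructor
  · rintro ⟨h1, h2⟩; exact ⟨h1, h2⟩
  · rintro ⟨h1, h2⟩; exact ⟨h1, h2⟩

lemma pv_digitChar_toNat_eq (c : Char) (h : PySem.Chars.isdigit c = true) :
    Nat.digitChar (c.toNat - 48) = c := by
  rw [pv_isdigit_iff] at h
  apply pv_char_eq_of_toNat
  have h10 : c.toNat - 48 < 10 := by omega
  rw [(pv_digitChar_lt10 _ h10).2]
  omega

def pvValN (ds : List Char) : Nat := ds.foldl (fun a d => 10 * a + (d.toNat - 48)) 0

lemma pv_val_eq_valN (ds : List Char) (hd : ∀ c ∈ ds, PySem.Chars.isdigit c = true) :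
    pvDigitsVal ds = (pvValN ds : Int) := by
  unfold pvDigitsVal pvValN
  suffices h : ∀ (an : Nat), ds.foldl (fun a d => 10 * a + ((d.toNat : Int) - 48)) (an : Int)
      = ((ds.foldl (fun a d => 10 * a + (d.toNat - 48)) an : Nat) : Int) by
    simpa using h 0
  induction ds with
  | nil => intro an; simp
  | cons c t ih =>
    intro an
    have hc := (pv_isdigit_iff c).mp (hd c (by simp))
    have : (10 : Int) * an + ((c.toNat : Int) - 48) = ((10 * an + (c.toNat - 48) : Nat) : Int) := by
      push_cast; omega
    simp only [List.foldl_cons, this]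
    exact ih (fun x hx => hd x (by simp [hx])) _

lemma pv_valN_core (L : List Nat) (hL : ∀ d ∈ L, d < 10) : ∀ (a : Nat),
    (L.reverse.map Nat.digitChar).foldl (fun a d => 10 * a + (d.toNat - 48)) a
      = a * 10 ^ L.length + Nat.ofDigits 10 L := by
  induction L with
  | nil => intro a; simp [Nat.ofDigits]
  | cons d t ih =>
    intro a
    have hd10 := (pv_digitChar_lt10 d (hL d (by simp))).2
    simp only [List.reverse_cons, List.map_append, List.foldl_append, List.map_cons, List.map_nil,
      List.foldl_cons, List.foldl_nil, ih (fun x hx => hL x (by simp [hx])), hd10,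
      Nat.ofDigits_cons, List.length_cons]
    ring_nf
    omega

lemma pv_val_digitsOf (n : Nat) : pvDigitsVal (pvDigitsOf n) = n := by
  rcases Nat.eq_zero_or_pos n with h0 | h0
  · subst h0; decide
  · have hne : n ≠ 0 := Nat.pos_iff_ne_zero.mp h0
    have hdig : ∀ c ∈ pvDigitsOf n, PySem.Chars.isdigit c = true := by
      intro c hc
      simp [pvDigitsOf, hne] at hc
      obtain ⟨d, hd, rfl⟩ := hc
      exact (pv_digitChar_lt10 d (Nat.digits_lt_base (by norm_num) hd)).1
    rw [pv_val_eq_valN _ hdig]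
    unfold pvValN
    simp only [pvDigitsOf, if_neg hne]
    rw [pv_valN_core _ (fun d hd => Nat.digits_lt_base (by norm_num) hd) 0]
    simp [Nat.ofDigits_digits]

lemma pv_digitsOf_digits (n : Nat) : ∀ c ∈ pvDigitsOf n, PySem.Chars.isdigit c = true := by
  rcases Nat.eq_zero_or_pos n with h0 | h0
  · subst h0; intro c hc; simp [pvDigitsOf] at hc; subst hc; decide
  · intro c hc
    simp [pvDigitsOf, Nat.pos_iff_ne_zero.mp h0] at hc
    obtain ⟨d, hd, rfl⟩ := hc
    exact (pv_digitChar_lt10 d (Nat.digits_lt_base (by norm_num) hd)).1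

lemma pv_digitsOf_ne_nil (n : Nat) : pvDigitsOf n ≠ [] := by
  unfold pvDigitsOf
  split
  · simp
  · simp [Nat.digits_ne_nil_iff_ne_zero.mpr (by assumption)]

lemma pv_digitsOf_noLZ (n : Nat) : pvDigitsOf n = ['0'] ∨ (pvDigitsOf n).head? ≠ some '0' := by
  rcases Nat.eq_zero_or_pos n with h0 | h0
  · subst h0; left; rfl
  · right
    have hne : n ≠ 0 := Nat.pos_iff_ne_zero.mp h0
    have hnil : Nat.digits 10 n ≠ [] := Nat.digits_ne_nil_iff_ne_zero.mpr hne
    simp only [pvDigitsOf, if_neg hne, ← List.map_reverse, List.head?_map, List.head?_reverse]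
    rw [List.getLast?_eq_some_getLast hnil]
    simp only [Option.map_some]
    intro hcontra
    have hlast := Nat.getLast_digit_ne_zero 10 hne
    have h0' : Nat.digitChar ((Nat.digits 10 n).getLast hnil) = '0' := by
      simpa using hcontra
    have hlt : (Nat.digits 10 n).getLast hnil < 10 :=
      Nat.digits_lt_base (by norm_num) (List.getLast_mem hnil)
    interval_cases h : (Nat.digits 10 n).getLast hnil <;> simp_all <;> exact absurd h0' (by decide)

lemma pv_val_nonneg (ds : List Char) (hd : ∀ c ∈ ds, PySem.Chars.isdigit c = true) :
    0 ≤ pvDigitsVal ds := by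
  rw [pv_val_eq_valN ds hd]
  exact Int.natCast_nonneg _

lemma pv_toChars_eq (i : Int) (hi : 0 ≤ i) : PySem.Int.toChars i = pvDigitsOf i.toNat := by
  unfold PySem.Int.toChars
  rw [if_neg (by omega)]
  unfold Nat.toDigits
  rw [core_shift i.toNat i.toNat []
    (lt_of_lt_of_le (Nat.lt_pow_self (by norm_num)) (Nat.pow_le_pow_right (by norm_num) (by omega)))]
  simp

lemma pv_digitsOf_val (ds : List Char) (hd : ∀ c ∈ ds, PySem.Chars.isdigit c = true) (hne : ds ≠ [])
    (hlz : ds = ['0'] ∨ ds.head? ≠ some '0') : pvDigitsOf (pvDigitsVal ds).toNat = ds := by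
  rcases hlz with h0 | hlz
  · subst h0; decide
  · -- ds has no leading zero and is nonempty
    set L : List Nat := (ds.map (fun c => c.toNat - 48)).reverse with hL
    have hds : ds = L.reverse.map Nat.digitChar := by
      rw [hL, List.reverse_reverse, List.map_map]
      conv_lhs => rw [← List.map_id ds]
      apply List.map_congr_left
      intro c hc
      exact (pv_digitChar_toNat_eq c (hd c hc)).symm
    have hL10 : ∀ d ∈ L, d < 10 := by
      intro d hdm
      rw [hL] at hdm
      simp only [List.mem_reverse, List.mem_map] at hdm
      obtain ⟨c, hc, rfl⟩ := hdm
      have := (pv_isdigit_iff c).mp (hd c hc)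
      omega
    have hval : pvDigitsVal ds = ((Nat.ofDigits 10 L : Nat) : Int) := by
      rw [pv_val_eq_valN ds hd]
      unfold pvValN
      rw [hds, pv_valN_core L hL10 0]
      simp
    have hLne : L ≠ [] := by
      rw [hL]; simp; intro h; exact hne (by simpa using h)
    have hlast : L.getLast hLne ≠ 0 := by
      intro hc
      apply hlz
      rw [hds, List.head?_map, List.head?_reverse, List.getLast?_eq_some_getLast hLne, Option.map_some, hc]
      rfl
    have hn0 : Nat.ofDigits 10 L ≠ 0 := by
      intro hc
      have := Nat.digits_ofDigits 10 (by norm_num) L hL10 (fun _ => hlast)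
      rw [hc] at this
      simp only [Nat.digits_zero] at this
      exact hLne this.symm
    rw [hval]
    simp only [Int.toNat_natCast]
    unfold pvDigitsOf
    rw [if_neg hn0, Nat.digits_ofDigits 10 (by norm_num) L hL10 (fun _ => hlast), ← hds]

-- ---------- splitOn characterisation ----------

lemma pv_go_clean (sep : List Char) :
    ∀ (l : List Char) (fuel : Nat) (cur : List Char) (acc : List (List Char)),
      (¬ sep <:+: l) →
      PySem.Chars.splitOn.go sep fuel l cur acc = acc.reverse ++ [cur.reverse ++ l] := by
  intro l
  induction l with
  | nil =>
    intro fuel cur acc _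
    match fuel with
    | 0 => rw [PySem.Chars.splitOn.go]; simp
    | f + 1 => rw [PySem.Chars.splitOn.go]; simp; omega
  | cons c rest ih =>
    intro fuel cur acc h
    match fuel with
    | 0 => rw [PySem.Chars.splitOn.go]; simp
    | f + 1 =>
      have hp : sep.isPrefixOf (c :: rest) = false := by
        rw [← Bool.not_eq_true, List.isPrefixOf_iff_prefix]
        exact fun hpre => h hpre.isInfix
      rw [PySem.Chars.splitOn.go]
      simp only [hp, Bool.false_eq_true, if_false]
      rw [ih f (c :: cur) acc (fun hin => h (hin.trans (List.suffix_cons c rest).isInfix))]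
      simp


lemma pv_go_step (sep : List Char) (f : Nat) (c : Char) (r cur : List Char) (acc : List (List Char))
    (h : sep.isPrefixOf (c :: r) = false) :
    PySem.Chars.splitOn.go sep (f + 1) (c :: r) cur acc
      = PySem.Chars.splitOn.go sep f r (c :: cur) acc := by
  rw [PySem.Chars.splitOn.go]
  simp [h]

lemma pv_go_match (sep : List Char) (f : Nat) (c : Char) (r cur : List Char) (acc : List (List Char))
    (h : sep.isPrefixOf (c :: r) = true) :
    PySem.Chars.splitOn.go sep (f + 1) (c :: r) cur acc
      = PySem.Chars.splitOn.go sep f ((c :: r).drop sep.length) [] (cur.reverse :: acc) := by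
  rw [PySem.Chars.splitOn.go]
  simp [h]

lemma pv_first_occ (sep l : List Char) (hsep : sep ≠ []) (hin : sep <:+: l) :
    ∃ pre rest, l = pre ++ sep ++ rest ∧ (∀ j < pre.length, ¬ sep <+: l.drop j) := by
  have hfind : 0 ≤ PySem.Chars.find l sep := (PySem.Chars.find_nonneg_iff l sep).mpr hin
  obtain ⟨hpre, hmin⟩ := PySem.Chars.find_spec hfind
  set p : Nat := (PySem.Chars.find l sep).toNat with hp
  have hple : p ≤ l.length := by
    have := PySem.Chars.find_le_length (s := l) (sub := sep)
    omega
  obtain ⟨tail, htail⟩ := hpre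
  refine ⟨l.take p, tail, ?_, ?_⟩
  · conv_lhs => rw [← List.take_append_drop p l]
    rw [← htail, List.append_assoc]
  · intro j hj
    rw [List.length_take] at hj
    exact hmin j (by omega)

lemma pv_go_combo (sep : List Char) (hsep : sep ≠ []) :
    ∀ (pre rest : List Char) (fuel : Nat) (cur : List Char) (acc : List (List Char)),
      pre.length + sep.length + rest.length < fuel →
      (∀ j < pre.length, ¬ sep <+: (pre ++ sep ++ rest).drop j) →
      PySem.Chars.splitOn.go sep fuel (pre ++ sep ++ rest) cur acc
        = PySem.Chars.splitOn.go sep (fuel - (pre.length + 1)) rest [] ((cur.reverse ++ pre) :: acc) := by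
  intro pre
  induction pre with
  | nil =>
    intro rest fuel cur acc hfuel _
    obtain ⟨s0, stl, rfl⟩ : ∃ s0 stl, sep = s0 :: stl := by
      cases sep with
      | nil => exact absurd rfl hsep
      | cons a b => exact ⟨a, b, rfl⟩
    simp only [List.nil_append, List.length_nil]
    match fuel, hfuel with
    | f + 1, _ =>
      have hp : (s0 :: stl).isPrefixOf (s0 :: (stl ++ rest)) = true := by
        rw [List.isPrefixOf_iff_prefix]
        simpa using List.prefix_append (s0 :: stl) rest
      have hsh : (s0 :: stl) ++ rest = s0 :: (stl ++ rest) := by simp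
      rw [hsh, pv_go_match _ _ _ _ _ _ hp, ← hsh, List.drop_left]
      simp
  | cons c pre' ih =>
    intro rest fuel cur acc hfuel hmin
    simp only [List.length_cons] at hfuel ⊢
    match fuel, hfuel with
    | f + 1, _ =>
      have hnp : sep.isPrefixOf (c :: (pre' ++ sep ++ rest)) = false := by
        rw [← Bool.not_eq_true, List.isPrefixOf_iff_prefix]
        have := hmin 0 (by simp)
        simpa using this
      have hsh : ((c :: pre') ++ sep ++ rest) = c :: (pre' ++ sep ++ rest) := by simp
      rw [hsh, pv_go_step _ _ _ _ _ _ hnp]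
      rw [ih rest f (c :: cur) acc (by omega)
        (by intro j hj; have := hmin (j + 1) (by simp; omega); rw [hsh] at this; simpa using this)]
      have : (c :: cur).reverse ++ pre' = cur.reverse ++ c :: pre' := by simp
      rw [this]
      congr 1
      omega

lemma pv_go_splitOn (sep : List Char) (hsep : sep ≠ []) :
    ∀ (n : Nat) (l : List Char), l.length ≤ n → ∀ (fuel : Nat) (acc : List (List Char)), l.length < fuel →
      PySem.Chars.splitOn.go sep fuel l [] acc = acc.reverse ++ PySem.Chars.splitOn l sep := by
  intro n
  induction n with
  | zero =>
    intro l hl fuel acc hfuel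
    have : l = [] := List.length_eq_zero_iff.mp (by omega)
    subst this
    by_cases hin : sep <:+: []
    · exact absurd (List.eq_nil_of_infix_nil hin) hsep
    · rw [pv_go_clean sep [] fuel [] acc hin]
      unfold PySem.Chars.splitOn
      rw [pv_go_clean sep [] _ [] [] hin]
      simp
  | succ n ih =>
    intro l hl fuel acc hfuel
    by_cases hin : sep <:+: l
    · obtain ⟨pre, rest, rfl, hmin⟩ := pv_first_occ sep l hsep hin
      have hlen : (pre ++ sep ++ rest).length = pre.length + sep.length + rest.length := by
        simp; omega
      have hsl : 1 ≤ sep.length := by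
        cases sep with
        | nil => exact absurd rfl hsep
        | cons a b => simp
      rw [pv_go_combo sep hsep pre rest fuel [] acc (by omega) hmin]
      simp only [List.reverse_nil, List.nil_append]
      rw [ih rest (by omega) _ (pre :: acc) (by omega)]
      unfold PySem.Chars.splitOn
      rw [pv_go_combo sep hsep pre rest _ [] [] (by rw [hlen]; omega) hmin]
      simp only [List.reverse_nil, List.nil_append]
      rw [ih rest (by omega) _ [pre] (by rw [hlen]; omega)]
      simp
      rfl
    · rw [pv_go_clean sep l fuel [] acc hin]
      unfold PySem.Chars.splitOn
      rw [pv_go_clean sep l _ [] [] hin]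
      simp

lemma pv_splitOn_not_infix (cs sep : List Char) (hsep : sep ≠ []) (h : ¬ sep <:+: cs) :
    PySem.Chars.splitOn cs sep = [cs] := by
  unfold PySem.Chars.splitOn
  rw [pv_go_clean sep cs _ [] [] h]
  simp

lemma pv_splitOn_pos (cs sep : List Char) (hsep : sep ≠ []) (h : sep <:+: cs) :
    ∃ pre rest, cs = pre ++ sep ++ rest ∧ (∀ j < pre.length, ¬ sep <+: cs.drop j) ∧
      PySem.Chars.splitOn cs sep = pre :: PySem.Chars.splitOn rest sep ∧
      rest.length + sep.length ≤ cs.length := by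
  obtain ⟨pre, rest, rfl, hmin⟩ := pv_first_occ sep cs hsep h
  have hsl : 1 ≤ sep.length := by
    cases sep with
    | nil => exact absurd rfl hsep
    | cons a b => simp
  have hlen : (pre ++ sep ++ rest).length = pre.length + sep.length + rest.length := by
    simp; omega
  refine ⟨pre, rest, rfl, hmin, ?_, by rw [hlen]; omega⟩
  unfold PySem.Chars.splitOn
  rw [pv_go_combo sep hsep pre rest _ [] [] (by rw [hlen]; omega) hmin]
  simp only [List.reverse_nil, List.nil_append]
  rw [pv_go_splitOn sep hsep rest.length rest (le_refl _) _ [pre] (by rw [hlen]; omega)]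
  simp
  rfl

lemma pv_splitOn_ne_nil (cs sep : List Char) (hsep : sep ≠ []) :
    PySem.Chars.splitOn cs sep ≠ [] := by
  by_cases hin : sep <:+: cs
  · obtain ⟨pre, rest, _, _, heq, _⟩ := pv_splitOn_pos cs sep hsep hin
    rw [heq]; simp
  · rw [pv_splitOn_not_infix cs sep hsep hin]; simp

-- ---------- the j-loop of A is a join ----------

def pvJoin (f : List Char → List Char) (user : List Char) : List (List Char) → List Char
  | [] => []
  | x :: xs => f x ++ xs.flatMap (fun p => user ++ f p)

lemma pv_foldl_enum_eq_join (f : List Char → List Char) (user : List Char) (xs : List (List Char)) :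
    (PySem.List.enumerate xs).foldl
      (fun msg jp => (if jp.1 > 0 then msg ++ user else msg) ++ f jp.2) []
      = pvJoin f user xs := by
  have aux : ∀ (xs : List (List Char)) (s : Int), 0 < s → ∀ (msg : List Char),
      (PySem.List.enumerate xs s).foldl
        (fun msg jp => (if jp.1 > 0 then msg ++ user else msg) ++ f jp.2) msg
        = msg ++ xs.flatMap (fun p => user ++ f p) := by
    intro xs
    induction xs with
    | nil => intro s hs msg; simp [PySem.List.enumerate]
    | cons x t ih =>
      intro s hs msg
      rw [PySem.List.enumerate]
      simp only [List.foldl_cons, if_pos hs]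
      rw [ih (s + 1) (by omega)]
      simp
  cases xs with
  | nil => simp [PySem.List.enumerate, pvJoin]
  | cons x t =>
    rw [PySem.List.enumerate]
    simp only [List.foldl_cons]
    have h0 : ¬ ((0 : Int) > 0) := by omega
    rw [if_neg h0]
    rw [aux t (0 + 1) (by omega)]
    simp [pvJoin]

lemma pv_join_congr (f g : List Char → List Char) (user : List Char) (xs : List (List Char))
    (h : ∀ x, f x = g x) : pvJoin f user xs = pvJoin g user xs := by
  cases xs with
  | nil => rfl
  | cons x t =>
    simp only [pvJoin, h]

-- ---------- scan step lemmas ----------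

-- validity condition of the scan at '[' :: rest, abbreviated
def pvCond (rest : List Char) : Prop :=
  (rest.takeWhile PySem.Chars.isdigit) ≠ [] ∧
    (rest.drop (rest.takeWhile PySem.Chars.isdigit).length).head? = some ']' ∧
    ((rest.takeWhile PySem.Chars.isdigit) = ['0'] ∨ (rest.takeWhile PySem.Chars.isdigit).head? ≠ some '0')


lemma scan_nil (pl : List String) (i : Int) : insert_user_scan pl i [] = [] := by
  rw [insert_user_scan]

lemma scan_other (pl : List String) (i : Int) (c : Char) (rest : List Char) (h : ¬ c = '[') :
    insert_user_scan pl i (c :: rest) = c :: insert_user_scan pl i rest := by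
  rw [insert_user_scan]
  simp [h]

lemma scan_bad (pl : List String) (i : Int) (rest : List Char)
    (h : ¬ pvCond rest) :
    insert_user_scan pl i ('[' :: rest) = '[' :: insert_user_scan pl i rest := by
  unfold pvCond at h
  rw [insert_user_scan]
  split_ifs <;> first | rfl | tauto

lemma scan_guard (pl : List String) (i : Int) (rest : List Char)
    (h : pvCond rest)
    (hg : ¬ (i ≤ pvDigitsVal (rest.takeWhile PySem.Chars.isdigit) ∧ pvDigitsVal (rest.takeWhile PySem.Chars.isdigit) < PySem.List.len pl)) :
    insert_user_scan pl i ('[' :: rest) = '[' :: insert_user_scan pl i rest := by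
  unfold pvCond at h
  rw [insert_user_scan]
  split_ifs <;> first | rfl | tauto

lemma scan_rep (pl : List String) (i : Int) (rest : List Char)
    (h : pvCond rest)
    (hg : (i ≤ pvDigitsVal (rest.takeWhile PySem.Chars.isdigit) ∧ pvDigitsVal (rest.takeWhile PySem.Chars.isdigit) < PySem.List.len pl)) :
    insert_user_scan pl i ('[' :: rest) = (PySem.List.pyGetD pl (pvDigitsVal (rest.takeWhile PySem.Chars.isdigit)) "").toList
      ++ insert_user_scan pl i ((rest.drop (rest.takeWhile PySem.Chars.isdigit).length).drop 1) := by
  unfold pvCond at h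
  rw [insert_user_scan]
  split_ifs <;> first | rfl | tauto


lemma pv_drop_takeWhile (p : Char → Bool) (l : List Char) :
    l.drop (l.takeWhile p).length = l.dropWhile p := by
  induction l with
  | nil => rfl
  | cons c t ih =>
    by_cases h : p c
    · simp [h, ih]
    · simp [h]

lemma pv_digitsVal_toNat (ds : List Char) (hd : ∀ c ∈ ds, PySem.Chars.isdigit c = true)
    (hne : ds ≠ []) (hlz : ds = ['0'] ∨ ds.head? ≠ some '0') (i : Int) (hi : 0 ≤ i)
    (hv : pvDigitsVal ds = i) : ds = PySem.Int.toChars i := by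
  have hrt := pv_digitsOf_val ds hd hne hlz
  rw [pv_toChars_eq i hi, ← hv, hrt]

-- at a valid placeholder whose value is i, the text is exactly the separator "[i]"
lemma pv_cond_decomp (i : Int) (hi : 0 ≤ i) (rest : List Char) (h : pvCond rest)
    (hv : pvDigitsVal (rest.takeWhile PySem.Chars.isdigit) = i) :
    '[' :: rest = ('[' :: (PySem.Int.toChars i ++ [']']))
      ++ (rest.drop ((rest.takeWhile PySem.Chars.isdigit).length + 1)) := by
  unfold pvCond at h
  obtain ⟨hne, hhd, hlz⟩ := h
  have hds : rest.takeWhile PySem.Chars.isdigit = PySem.Int.toChars i :=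
    pv_digitsVal_toNat _ (fun c hc => List.mem_takeWhile_imp hc) hne hlz i hi hv
  obtain ⟨tail, htail⟩ := List.takeWhile_prefix (l := rest) PySem.Chars.isdigit
  have hdrop : rest.drop (rest.takeWhile PySem.Chars.isdigit).length = tail := by
    rw [pv_drop_takeWhile]
    have h2 := List.takeWhile_append_dropWhile (p := PySem.Chars.isdigit) (l := rest)
    exact List.append_cancel_left (h2.trans htail.symm)
  rw [hdrop] at hhd
  obtain ⟨tl, rfl⟩ : ∃ tl, tail = ']' :: tl := by
    cases tail with
    | nil => simp at hhd
    | cons a b => simp at hhd; exact ⟨b, by rw [hhd]⟩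
  have hdrop1 : rest.drop ((rest.takeWhile PySem.Chars.isdigit).length + 1) = tl := by
    rw [← List.tail_drop, hdrop]
    rfl
  rw [hdrop1, ← htail, hds]
  simp

-- scanning "[i]" ++ tail replaces the head placeholder
lemma pv_scan_sep (pl : List String) (i : Int) (hi : 0 ≤ i) (hlen : i < PySem.List.len pl)
    (tail : List Char) :
    insert_user_scan pl i (('[' :: (PySem.Int.toChars i ++ [']'])) ++ tail)
      = (PySem.List.pyGetD pl i "").toList ++ insert_user_scan pl i tail := by
  have hsh : ('[' :: (PySem.Int.toChars i ++ [']'])) ++ tail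
      = '[' :: (PySem.Int.toChars i ++ ']' :: tail) := by simp
  have hdig : ∀ c ∈ PySem.Int.toChars i, PySem.Chars.isdigit c = true := by
    rw [pv_toChars_eq i hi]; exact pv_digitsOf_digits _
  have htw : (PySem.Int.toChars i ++ ']' :: tail).takeWhile PySem.Chars.isdigit
      = PySem.Int.toChars i := by
    rw [List.takeWhile_append]
    rw [List.takeWhile_eq_self_iff.mpr hdig]
    simp [show PySem.Chars.isdigit ']' = false from by decide]
  have hdr : (PySem.Int.toChars i ++ ']' :: tail).drop (PySem.Int.toChars i).length
      = ']' :: tail := List.drop_left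
  have hne : PySem.Int.toChars i ≠ [] := by
    rw [pv_toChars_eq i hi]; exact pv_digitsOf_ne_nil _
  have hlz : PySem.Int.toChars i = ['0'] ∨ (PySem.Int.toChars i).head? ≠ some '0' := by
    rw [pv_toChars_eq i hi]; exact pv_digitsOf_noLZ _
  have hval : pvDigitsVal (PySem.Int.toChars i) = i := by
    rw [pv_toChars_eq i hi]
    rw [pv_val_digitsOf i.toNat]
    omega
  rw [hsh, scan_rep pl i _ (by unfold pvCond; rw [htw, hdr]; exact ⟨hne, rfl, hlz⟩) (by rw [htw, hval]; exact ⟨le_refl i, hlen⟩)]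
  rw [htw, hval, hdr]
  simp

-- ---------- scan lemmas ----------

lemma pv_scan_id (pl : List String) (i : Int)
    (hno : ∀ k : Int, 0 ≤ k → ¬ (i ≤ k ∧ k < PySem.List.len pl)) (cs : List Char) :
    insert_user_scan pl i cs = cs := by
  have main : ∀ (n : Nat) (cs : List Char), cs.length ≤ n → insert_user_scan pl i cs = cs := by
    intro n
    induction n with
    | zero =>
      intro cs hcs
      have hnil : cs = [] := List.length_eq_zero_iff.mp (by omega)
      subst hnil
      exact scan_nil pl i
    | succ n ih =>
      intro cs hcs
      cases cs with
      | nil => exact scan_nil pl i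
      | cons c rest =>
        simp only [List.length_cons] at hcs
        by_cases hc : c = '['
        · subst hc
          by_cases hcond : pvCond rest
          · rw [scan_guard pl i rest hcond ?hg, ih rest (by omega)]
            case hg =>
              intro hg
              exact hno _ (pv_val_nonneg _ (fun c hc => List.mem_takeWhile_imp hc)) hg
          · rw [scan_bad pl i rest hcond, ih rest (by omega)]
        · rw [scan_other pl i c rest hc, ih rest (by omega)]
  exact main cs.length cs (le_refl _)

lemma pv_scan_agree (pl : List String) (i : Int) (hi : 0 ≤ i) (cs : List Char)
    (h : ¬ ('[' :: (PySem.Int.toChars i ++ [']'])) <:+: cs) :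
    insert_user_scan pl (i + 1) cs = insert_user_scan pl i cs := by
  have main : ∀ (n : Nat) (cs : List Char), cs.length ≤ n →
      ¬ ('[' :: (PySem.Int.toChars i ++ [']'])) <:+: cs →
      insert_user_scan pl (i + 1) cs = insert_user_scan pl i cs := by
    intro n
    induction n with
    | zero =>
      intro cs hcs _
      have hnil : cs = [] := List.length_eq_zero_iff.mp (by omega)
      subst hnil
      rw [scan_nil, scan_nil]
    | succ n ih =>
      intro cs hcs hinf
      cases cs with
      | nil => rw [scan_nil, scan_nil]
      | cons c rest =>
        simp only [List.length_cons] at hcs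
        have hrest_inf : ¬ ('[' :: (PySem.Int.toChars i ++ [']'])) <:+: rest :=
          fun hin => hinf (hin.trans (List.suffix_cons c rest).isInfix)
        by_cases hc : c = '['
        · subst hc
          by_cases hcond : pvCond rest
          · have hk0 : 0 ≤ pvDigitsVal (rest.takeWhile PySem.Chars.isdigit) :=
              pv_val_nonneg _ (fun c hc => List.mem_takeWhile_imp hc)
            by_cases hk : pvDigitsVal (rest.takeWhile PySem.Chars.isdigit) = i
            · exfalso
              have hpre : ('[' :: (PySem.Int.toChars i ++ [']'])) <+: ('[' :: rest) :=
                ⟨rest.drop ((rest.takeWhile PySem.Chars.isdigit).length + 1),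
                  (pv_cond_decomp i hi rest hcond hk).symm⟩
              exact hinf hpre.isInfix
            · by_cases hg : i ≤ pvDigitsVal (rest.takeWhile PySem.Chars.isdigit) ∧
                  pvDigitsVal (rest.takeWhile PySem.Chars.isdigit) < PySem.List.len pl
              · have hg' : i + 1 ≤ pvDigitsVal (rest.takeWhile PySem.Chars.isdigit) ∧
                    pvDigitsVal (rest.takeWhile PySem.Chars.isdigit) < PySem.List.len pl := by
                  omega
                rw [scan_rep pl (i+1) rest hcond hg', scan_rep pl i rest hcond hg]
                congr 1
                apply ih _ (by simp; omega)
                intro hin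
                have hsuf : ((rest.drop (rest.takeWhile PySem.Chars.isdigit).length).drop 1)
                    <:+ ('[' :: rest) :=
                  (List.drop_suffix 1 _).trans ((List.drop_suffix _ rest).trans
                    (List.suffix_cons '[' rest))
                exact hinf (hin.trans hsuf.isInfix)
              · have hg' : ¬ (i + 1 ≤ pvDigitsVal (rest.takeWhile PySem.Chars.isdigit) ∧
                    pvDigitsVal (rest.takeWhile PySem.Chars.isdigit) < PySem.List.len pl) := by
                  omega
                rw [scan_guard pl (i+1) rest hcond hg', scan_guard pl i rest hcond hg,
                  ih rest (by omega) hrest_inf]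
          · rw [scan_bad pl (i+1) rest hcond, scan_bad pl i rest hcond, ih rest (by omega) hrest_inf]
        · rw [scan_other pl (i+1) c rest hc, scan_other pl i c rest hc, ih rest (by omega) hrest_inf]
  exact main cs.length cs (le_refl _) h

lemma pv_scan_split (pl : List String) (i : Int) (hi : 0 ≤ i) (hlen : i < PySem.List.len pl)
    (pre rest : List Char)
    (hmin : ∀ j < pre.length, ¬ ('[' :: (PySem.Int.toChars i ++ [']'])) <+:
        (pre ++ ('[' :: (PySem.Int.toChars i ++ [']'])) ++ rest).drop j) :
    insert_user_scan pl i (pre ++ ('[' :: (PySem.Int.toChars i ++ [']'])) ++ rest)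
      = insert_user_scan pl (i + 1) pre ++ (PySem.List.pyGetD pl i "").toList
        ++ insert_user_scan pl i rest := by 
  have main : ∀ (n : Nat) (pre rest : List Char), pre.length ≤ n →
      (∀ j < pre.length, ¬ ('[' :: (PySem.Int.toChars i ++ [']'])) <+:
          (pre ++ ('[' :: (PySem.Int.toChars i ++ [']'])) ++ rest).drop j) →
      insert_user_scan pl i (pre ++ ('[' :: (PySem.Int.toChars i ++ [']'])) ++ rest)
        = insert_user_scan pl (i + 1) pre ++ (PySem.List.pyGetD pl i "").toList
          ++ insert_user_scan pl i rest := by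
    intro n
    induction n with
    | zero =>
      intro pre rest hn _
      have hnil : pre = [] := List.length_eq_zero_iff.mp (by omega)
      subst hnil
      rw [scan_nil]
      simpa using pv_scan_sep pl i hi hlen rest
    | succ n ih =>
      intro pre rest hn hmin
      cases pre with
      | nil =>
        rw [scan_nil]
        simpa using pv_scan_sep pl i hi hlen rest
      | cons c pre' =>
        simp only [List.length_cons] at hn
        have hmin' : ∀ j < pre'.length, ¬ ('[' :: (PySem.Int.toChars i ++ [']'])) <+:
            (pre' ++ ('[' :: (PySem.Int.toChars i ++ [']'])) ++ rest).drop j := by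
          intro j hj
          have := hmin (j + 1) (by simp; omega)
          simpa [List.drop_succ_cons] using this
        have hsh : ((c :: pre') ++ ('[' :: (PySem.Int.toChars i ++ [']'])) ++ rest)
            = c :: (pre' ++ ('[' :: (PySem.Int.toChars i ++ [']'])) ++ rest) := by simp
        by_cases hc : c = '['
        · subst hc
          by_cases hall : ∀ x ∈ pre', PySem.Chars.isdigit x = true
          · -- pre' consists only of digits: both scans fail at the bracket
            have htwp : pre'.takeWhile PySem.Chars.isdigit = pre' :=
              List.takeWhile_eq_self_iff.mpr hall
            have hshs : ('[' :: (PySem.Int.toChars i ++ [']'])) ++ rest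
                = '[' :: ((PySem.Int.toChars i ++ [']']) ++ rest) := by simp
            have htwf : (pre' ++ ('[' :: (PySem.Int.toChars i ++ [']'])) ++ rest).takeWhile
                PySem.Chars.isdigit = pre' := by
              rw [List.append_assoc, List.takeWhile_append, htwp, if_pos rfl, hshs]
              simp [show PySem.Chars.isdigit '[' = false from by decide]
            have hdrf : (pre' ++ ('[' :: (PySem.Int.toChars i ++ [']'])) ++ rest).drop pre'.length
                = ('[' :: (PySem.Int.toChars i ++ [']'])) ++ rest := by
              rw [List.append_assoc]
              exact List.drop_left
            have hcf : ¬ pvCond (pre' ++ ('[' :: (PySem.Int.toChars i ++ [']'])) ++ rest) := by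
              unfold pvCond
              rw [htwf, hdrf, hshs]
              rintro ⟨-, hh, -⟩
              simp at hh
            have hcp : ¬ pvCond pre' := by
              unfold pvCond
              rw [htwp]
              rintro ⟨hne, hh, -⟩
              rw [List.drop_length] at hh
              simp at hh
            rw [hsh, scan_bad pl i _ hcf, scan_bad pl (i+1) pre' hcp,
              ih pre' rest (by omega) hmin']
            simp
          · -- the digit run stops inside pre'
            obtain ⟨dp, hdp⟩ : ∃ dp, pre'.takeWhile PySem.Chars.isdigit = dp := ⟨_, rfl⟩
            have hdp_pre : dp <+: pre' := hdp ▸ List.takeWhile_prefix _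
            have hdp_ne : dp ≠ pre' := by
              intro hcontra
              exact hall (List.takeWhile_eq_self_iff.mp (hdp.trans hcontra))
            have hdp_lt : dp.length < pre'.length := by
              have := hdp_pre.length_le
              rcases Nat.lt_or_ge dp.length pre'.length with h | h
              · exact h
              · exact absurd (hdp_pre.eq_of_length (by omega)) hdp_ne
            have hdp_dig : ∀ c ∈ dp, PySem.Chars.isdigit c = true :=
              fun c hc => List.mem_takeWhile_imp (hdp ▸ hc)
            obtain ⟨d, t, hr2⟩ : ∃ d t, pre'.drop dp.length = d :: t := by
              cases hx : pre'.drop dp.length with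
              | nil =>
                have := congrArg List.length hx
                simp at this
                omega
              | cons a b => exact ⟨a, b, rfl⟩
            have hdnd : PySem.Chars.isdigit d = false := by
              have hmatch := List.head?_dropWhile_not PySem.Chars.isdigit pre'
              rw [← pv_drop_takeWhile, hdp, hr2] at hmatch
              simpa using hmatch
            have hpre_split : pre' = dp ++ d :: t := by
              obtain ⟨suf, hsuf⟩ := hdp_pre
              have hds : pre'.drop dp.length = suf := by
                rw [← hsuf]; exact List.drop_left
              rw [← hsuf, hds.symm.trans hr2]
            have htwf : (pre' ++ ('[' :: (PySem.Int.toChars i ++ [']'])) ++ rest).takeWhile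
                PySem.Chars.isdigit = dp := by
              rw [List.append_assoc, List.takeWhile_append, hdp, if_neg (by omega)]
            have hdrf : (pre' ++ ('[' :: (PySem.Int.toChars i ++ [']'])) ++ rest).drop
                dp.length = d :: (t ++ ('[' :: (PySem.Int.toChars i ++ [']'])) ++ rest) := by
              rw [List.append_assoc, List.drop_append_of_le_length (by omega), hr2]
              simp
            by_cases hcnd : dp ≠ [] ∧ d = ']' ∧ (dp = ['0'] ∨ dp.head? ≠ some '0')
            · obtain ⟨hne2, rfl, hlz2⟩ := hcnd
              have hcf : pvCond (pre' ++ ('[' :: (PySem.Int.toChars i ++ [']'])) ++ rest) := by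
                unfold pvCond
                rw [htwf, hdrf]
                exact ⟨hne2, rfl, hlz2⟩
              have hcp : pvCond pre' := by
                unfold pvCond
                rw [hdp, hr2]
                exact ⟨hne2, rfl, hlz2⟩
              have hk0 : 0 ≤ pvDigitsVal dp := pv_val_nonneg _ hdp_dig
              by_cases hk : pvDigitsVal dp = i
              · exfalso
                have hds : dp = PySem.Int.toChars i :=
                  pv_digitsVal_toNat _ hdp_dig hne2 hlz2 i hi hk
                apply hmin 0 (by simp)
                rw [List.drop_zero, hsh, hpre_split, hds]
                exact ⟨t ++ ('[' :: (PySem.Int.toChars i ++ [']'])) ++ rest, by simp⟩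
              · by_cases hg : i ≤ pvDigitsVal dp ∧ pvDigitsVal dp < PySem.List.len pl
                · -- both scans replace this (distinct) placeholder
                  have hg' : i + 1 ≤ pvDigitsVal dp ∧ pvDigitsVal dp < PySem.List.len pl := by
                    omega
                  have hlen_pre : pre'.length = dp.length + t.length + 1 := by
                    rw [hpre_split]; simp; omega
                  have hmint : ∀ j < t.length, ¬ ('[' :: (PySem.Int.toChars i ++ [']'])) <+:
                      (t ++ ('[' :: (PySem.Int.toChars i ++ [']'])) ++ rest).drop j := by
                    intro j hj
                    have hbig := hmin (dp.length + 2 + j) (by simp; omega)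
                    intro hcontra
                    apply hbig
                    have hform : ((('[' :: pre') ++ ('[' :: (PySem.Int.toChars i ++ [']'])) ++ rest)
                        : List Char)
                        = ('[' :: dp ++ [']'])
                          ++ (t ++ ('[' :: (PySem.Int.toChars i ++ [']'])) ++ rest) := by
                      rw [hpre_split]; simp
                    rw [hform, List.drop_append]
                    have hlen2 : ('[' :: dp ++ [']']).length = dp.length + 2 := by simp
                    rw [List.drop_eq_nil_of_le (by rw [hlen2]; omega), hlen2]
                    have harith : dp.length + 2 + j - (dp.length + 2) = j := by omega
                    rw [harith]
                    simpa using hcontra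
                  rw [hsh, scan_rep pl i _ hcf (by rw [htwf]; exact hg),
                    scan_rep pl (i+1) pre' hcp (by rw [hdp]; exact hg'), htwf, hdrf, hdp, hr2]
                  have hdt2 : (((']' :: (t ++ ('[' :: (PySem.Int.toChars i ++ [']'])) ++ rest))) :
                      List Char).drop 1 = t ++ ('[' :: (PySem.Int.toChars i ++ [']'])) ++ rest := rfl
                  rw [hdt2, show ((']' :: t : List Char)).drop 1 = t from rfl,
                    ih t rest (by omega) hmint]
                  simp
                · have hg' : ¬ (i + 1 ≤ pvDigitsVal dp ∧ pvDigitsVal dp < PySem.List.len pl) := by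
                    omega
                  rw [hsh, scan_guard pl i _ hcf (by rw [htwf]; exact hg),
                    scan_guard pl (i+1) pre' hcp (by rw [hdp]; exact hg'),
                    ih pre' rest (by omega) hmin']
                  simp
            · -- invalid placeholder text: both scans emit '[' verbatim
              have hcf : ¬ pvCond (pre' ++ ('[' :: (PySem.Int.toChars i ++ [']'])) ++ rest) := by
                unfold pvCond
                rw [htwf, hdrf]
                rintro ⟨h1, h2, h3⟩
                simp only [List.head?_cons, Option.some.injEq] at h2
                exact hcnd ⟨h1, h2, h3⟩
              have hcp : ¬ pvCond pre' := by
                unfold pvCond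
                rw [hdp, hr2]
                rintro ⟨h1, h2, h3⟩
                simp only [List.head?_cons, Option.some.injEq] at h2
                exact hcnd ⟨h1, h2, h3⟩
              rw [hsh, scan_bad pl i _ hcf, scan_bad pl (i+1) pre' hcp,
                ih pre' rest (by omega) hmin']
              simp
        · rw [hsh, scan_other pl i c _ hc, scan_other pl (i+1) c pre' hc,
            ih pre' rest (by omega) hmin']
          simp
  exact main pre.length pre rest (le_refl _) hmin

lemma pv_key (pl : List String) (i : Int) (hi : 0 ≤ i) (hlen : i < PySem.List.len pl) (cs : List Char) :
    pvJoin (insert_user_scan pl (i + 1)) (PySem.List.pyGetD pl i "").toList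
        (PySem.Chars.splitOn cs ('[' :: (PySem.Int.toChars i ++ [']'])))
      = insert_user_scan pl i cs := by
  have hsep : ('[' :: (PySem.Int.toChars i ++ [']'])) ≠ [] := by simp
  have main : ∀ (n : Nat) (cs : List Char), cs.length ≤ n →
      pvJoin (insert_user_scan pl (i + 1)) (PySem.List.pyGetD pl i "").toList
          (PySem.Chars.splitOn cs ('[' :: (PySem.Int.toChars i ++ [']'])))
        = insert_user_scan pl i cs := by
    intro n
    induction n with
    | zero =>
      intro cs hcs
      have hnil : cs = [] := List.length_eq_zero_iff.mp (by omega)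
      subst hnil
      have hnin : ¬ ('[' :: (PySem.Int.toChars i ++ [']'])) <:+: ([] : List Char) := by
        intro hin
        exact hsep (List.eq_nil_of_infix_nil hin)
      rw [pv_splitOn_not_infix _ _ hsep hnin]
      show insert_user_scan pl (i+1) [] ++ _ = _
      rw [scan_nil, scan_nil]
      simp
    | succ n ih =>
      intro cs hcs
      by_cases hin : ('[' :: (PySem.Int.toChars i ++ [']'])) <:+: cs
      · obtain ⟨pre, rest, hcseq, hminp, hsplit, hrlen⟩ := pv_splitOn_pos cs _ hsep hin
        rw [hsplit]
        obtain ⟨r, rs, hrr⟩ : ∃ r rs, PySem.Chars.splitOn rest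
            ('[' :: (PySem.Int.toChars i ++ [']'])) = r :: rs := by
          cases hx : PySem.Chars.splitOn rest ('[' :: (PySem.Int.toChars i ++ [']'])) with
          | nil => exact absurd hx (pv_splitOn_ne_nil _ _ hsep)
          | cons a b => exact ⟨a, b, rfl⟩
        rw [hrr]
        have hjoin : pvJoin (insert_user_scan pl (i + 1)) (PySem.List.pyGetD pl i "").toList
            (pre :: r :: rs)
            = insert_user_scan pl (i + 1) pre ++ (PySem.List.pyGetD pl i "").toList
              ++ pvJoin (insert_user_scan pl (i + 1)) (PySem.List.pyGetD pl i "").toList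
                (r :: rs) := by
          simp [pvJoin]
        have hlt : rest.length ≤ n := by
          have h1 : PySem.Int.toChars i ≠ [] := by
            rw [pv_toChars_eq i hi]; exact pv_digitsOf_ne_nil _
          have h2 : 0 < (PySem.Int.toChars i).length := List.length_pos_iff.mpr h1
          simp at hrlen
          omega
        rw [hjoin, ← hrr, ih rest hlt]
        subst hcseq
        exact (pv_scan_split pl i hi hlen pre rest hminp).symm
      · rw [pv_splitOn_not_infix _ _ hsep hin]
        show insert_user_scan pl (i+1) cs ++ _ = _
        rw [pv_scan_agree pl i hi cs hin]
        simp
  exact main cs.length cs (le_refl _)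

lemma pv_main (pl : List String) (i : Int) (hi : 0 ≤ i) (cs : List Char) :
    insert_user_core pl i cs = insert_user_scan pl i cs := by
  have main : ∀ (n : Nat) (j : Int) (cs : List Char), 0 ≤ j →
      (PySem.List.len pl : Int) ≤ j + n →
      insert_user_core pl j cs = insert_user_scan pl j cs := by
    intro n
    induction n with
    | zero =>
      intro j cs hj hb
      rw [insert_user_core, dif_pos (by omega)]
      exact (pv_scan_id pl j (fun k hk0 hk => by omega) cs).symm
    | succ n ih =>
      intro j cs hj hb
      by_cases hle : PySem.List.len pl ≤ j
      · rw [insert_user_core, dif_pos hle]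
        exact (pv_scan_id pl j (fun k hk0 hk => by omega) cs).symm
      · rw [insert_user_core, dif_neg hle]
        rw [pv_foldl_enum_eq_join (insert_user_core pl (j + 1))
          ((PySem.List.pyGetD pl j "").toList)]
        rw [pv_join_congr (insert_user_core pl (j + 1)) (insert_user_scan pl (j + 1))
          ((PySem.List.pyGetD pl j "").toList) _
          (fun x => ih (j + 1) x (by omega) (by omega))]
        exact pv_key pl j hj (by omega) cs
  have hfin : (PySem.List.len pl : Int) ≤ i + (PySem.List.len pl).toNat := by
    simp [PySem.List.len_eq] at *
    omega
  exact main (PySem.List.len pl).toNat i cs hi hfin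

-- ===== VERDICT (by name: the statement is the Claim_ definition above) =====
theorem insert_user_spec : Claim_equal_insert_user := by
  intro line i pl _ hpre
  unfold Spec_insert_user insert_user insert_user_alt
  exact congrArg String.ofList (pv_main pl i hpre line.toList)
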